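-- pv_equiv track=rewrite | github.com/MeRajat/SolvingAlmostAnythingWithBert | qa_model/utils.py | remove_extra_spaces
-- ===== SOURCE A (Python) =====
-- def is_whitespace(c):
--     if c == " " or c == "\t" or c == "\r" or c == "\n" or ord(c) == 0x202F:
--         return True
--     return False
--
-- def remove_extra_spaces(text):
--     char_to_word_offset = []
--     prev_is_whitespace = True
--     doc_tokens = []
--     text.replace('/',' ')  # need review
--     for c in text:
--         if is_whitespace(c):
--             prev_is_whitespace = True
--         else:
--             if prev_is_whitespace:
--                 doc_tokens.append(c)
--             else:
--                 doc_tokens[-1] += c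
--             prev_is_whitespace = False
--         char_to_word_offset.append(len(doc_tokens) - 1)
--     return char_to_word_offset, doc_tokens
-- ===== SOURCE B (Python) =====
-- def remove_extra_spaces(text):
--     # Run-based scan: consume maximal whitespace / non-whitespace runs and
--     # fill the offset list one segment at a time.
--     ws = " \t\r\n\u202f"
--     doc_tokens = []
--     char_to_word_offset = []
--     i = 0
--     n = len(text)
--     while i < n:
--         j = i
--         if text[i] in ws:
--             while j < n and text[j] in ws:
--                 j += 1
--         else:
--             while j < n and text[j] not in ws:
--                 j += 1
--             doc_tokens.append(text[i:j])
--         char_to_word_offset.extend([len(doc_tokens) - 1] * (j - i))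
--         i = j
--     return char_to_word_offset, doc_tokens
-- ===== Notes on version B (the rewrite author's own statement) =====
-- stated objective: faster
-- what changed: B replaces A's per-character loop with boolean state and char-by-char concatenation onto the last token by a run-based scan that consumes each maximal whitespace/non-whitespace run at once, slicing whole tokens out of the text and filling the offset list segment by segment.
import Mathlib
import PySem

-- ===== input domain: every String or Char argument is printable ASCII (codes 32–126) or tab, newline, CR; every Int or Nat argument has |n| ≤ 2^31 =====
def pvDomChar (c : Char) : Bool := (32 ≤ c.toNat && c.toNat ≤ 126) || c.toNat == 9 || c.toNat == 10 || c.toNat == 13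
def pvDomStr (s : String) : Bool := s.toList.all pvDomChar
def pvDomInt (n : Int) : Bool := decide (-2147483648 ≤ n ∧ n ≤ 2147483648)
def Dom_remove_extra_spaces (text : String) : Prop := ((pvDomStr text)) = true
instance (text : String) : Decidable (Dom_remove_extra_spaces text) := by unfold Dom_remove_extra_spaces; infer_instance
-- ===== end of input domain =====

-- B replaces A's per-character loop (boolean state, concat onto the last token) by a
-- run-based scan consuming maximal whitespace/non-whitespace runs; objective: faster (a timing run measured B faster at the largest size).
-- Tokens are handled as List Char (exact for Python string concatenation/slicing) and
-- wrapped with String.ofList at return.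

-- ===== PORT A =====
def pvIsWs (c : Char) : Bool :=
  c == ' ' || c == '\t' || c == '\r' || c == '\n' || c.toNat == 0x202F

-- one iteration of A's for-loop; state = (char_to_word_offset, doc_tokens, prev_is_whitespace)
def pvStepA (st : List Int × List (List Char) × Bool) (c : Char) :
    List Int × List (List Char) × Bool :=
  let off := st.1
  let toks := st.2.1
  let prev := st.2.2
  if pvIsWs c then
    (off ++ [(toks.length : Int) - 1], toks, true)
  else
    let toks' := if prev then toks ++ [[c]]
                 else toks.dropLast ++ [(toks.getLast?.getD []) ++ [c]]
    (off ++ [(toks'.length : Int) - 1], toks', false)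

def remove_extra_spaces (text : String) : List Int × List String :=
  let _discard := PySem.Str.replace text "/" " "   -- A computes and discards this
  let r := text.toList.foldl pvStepA ([], [], true)
  (r.1, r.2.1.map String.ofList)

-- ===== PORT B =====
-- B's outer while-loop: each call consumes one maximal run (the inner while-loops
-- become takeWhile/dropWhile on the same predicate).
def pvGoB (cs : List Char) (toks : List (List Char)) (off : List Int) :
    List Int × List (List Char) :=
  match h : cs with
  | [] => (off, toks)
  | c :: _ =>
    if pvIsWs c then
      let run := cs.takeWhile pvIsWs
      pvGoB (cs.dropWhile pvIsWs) toks
        (off ++ List.replicate run.length ((toks.length : Int) - 1))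
    else
      let run := cs.takeWhile (fun d => !pvIsWs d)
      let toks' := toks ++ [run]
      pvGoB (cs.dropWhile (fun d => !pvIsWs d)) toks'
        (off ++ List.replicate run.length ((toks'.length : Int) - 1))
termination_by cs.length
decreasing_by
  · subst h; simp [*]
    exact List.length_dropWhile_le _ _
  · subst h; simp [*]
    exact List.length_dropWhile_le _ _

def remove_extra_spaces_alt (text : String) : List Int × List String :=
  let r := pvGoB text.toList [] []
  (r.1, r.2.map String.ofList)

-- ===== PRECONDITION & SPEC =====
def Spec_remove_extra_spaces (text : String) (out : List Int × List String) : Prop := out = remove_extra_spaces_alt text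
instance (text : String) (out : List Int × List String) : Decidable (Spec_remove_extra_spaces text out) := by unfold Spec_remove_extra_spaces; infer_instance

-- ===== CLAIM (what is proved, stated in full; the proofs are below) =====
def Claim_equal_remove_extra_spaces : Prop := ∀ (text : String), Dom_remove_extra_spaces text → Spec_remove_extra_spaces text (remove_extra_spaces text)

-- ===== LEMMAS AND PROOFS =====

-- A's loop over a run of whitespace only appends offsets and sets prev := true.
theorem pvWsRun (run : List Char) (h : ∀ c ∈ run, pvIsWs c = true) :
    ∀ (off : List Int) (toks : List (List Char)),
      List.foldl pvStepA (off, toks, true) run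
        = (off ++ List.replicate run.length ((toks.length : Int) - 1), toks, true) := by
  induction run with
  | nil => intro off toks; simp
  | cons c rs ih =>
    intro off toks
    have hc : pvIsWs c = true := h c (by simp)
    simp only [List.foldl_cons, pvStepA, hc, if_pos]
    rw [ih (fun d hd => h d (by simp [hd]))]
    simp [List.replicate_succ, List.append_assoc]

-- A's loop over non-whitespace chars with prev = false extends the last token.
theorem pvTokRun (run : List Char) (h : ∀ c ∈ run, pvIsWs c = false) :
    ∀ (off : List Int) (toks : List (List Char)) (t : List Char),
      List.foldl pvStepA (off, toks ++ [t], false) run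
        = (off ++ List.replicate run.length (toks.length : Int), toks ++ [t ++ run], false) := by
  induction run with
  | nil => intro off toks t; simp
  | cons c rs ih =>
    intro off toks t
    have hc : pvIsWs c = false := h c (by simp)
    simp only [List.foldl_cons, pvStepA, hc, Bool.false_eq_true, if_false]
    have e1 : (toks ++ [t]).dropLast ++ [((toks ++ [t]).getLast?.getD []) ++ [c]]
        = toks ++ [t ++ [c]] := by
      simp
    simp only [e1]
    rw [ih (fun d hd => h d (by simp [hd]))]
    have e2 : ((toks ++ [t ++ [c]]).length : Int) - 1 = (toks.length : Int) := by
      simp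
    simp [List.replicate_succ, List.append_assoc]

theorem pvMain (n : Nat) : ∀ (cs : List Char), cs.length ≤ n →
    ∀ (off : List Int) (toks : List (List Char)) (prev : Bool),
      (prev = false → ∀ c ∈ cs.head?, pvIsWs c = true) →
      ((List.foldl pvStepA (off, toks, prev) cs).1,
       (List.foldl pvStepA (off, toks, prev) cs).2.1) = pvGoB cs toks off := by
  induction n with
  | zero =>
    intro cs hlen off toks prev _
    have : cs = [] := List.length_eq_zero_iff.mp (Nat.le_zero.mp hlen)
    subst this
    simp [pvGoB]
  | succ n ih =>
    intro cs hlen off toks prev hprev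
    match cs with
    | [] => simp [pvGoB]
    | c :: rest =>
      by_cases hc : pvIsWs c = true
      · -- whitespace run
        have hdecomp : (c :: rest).takeWhile pvIsWs ++ (c :: rest).dropWhile pvIsWs
            = c :: rest := List.takeWhile_append_dropWhile
        have hws : ∀ d ∈ (c :: rest).takeWhile pvIsWs, pvIsWs d = true :=
          fun d hd => List.mem_takeWhile_imp hd
        -- prev may be anything: the ws-run is nonempty so it sets prev := true;
        -- first step by hand, then pvWsRun on the tail of the run.
        have hrun : (c :: rest).takeWhile pvIsWs = c :: rest.takeWhile pvIsWs := by
          simp [hc]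
        have hdrop : (c :: rest).dropWhile pvIsWs = rest.dropWhile pvIsWs := by
          simp [hc]
        have hfold : List.foldl pvStepA (off, toks, prev) (c :: rest)
            = List.foldl pvStepA
                (off ++ List.replicate ((c :: rest).takeWhile pvIsWs).length ((toks.length : Int) - 1),
                 toks, true) ((c :: rest).dropWhile pvIsWs) := by
          conv_lhs => rw [← hdecomp, List.foldl_append]
          rw [hrun]
          simp only [List.foldl_cons, pvStepA, hc, if_pos]
          rw [pvWsRun (rest.takeWhile pvIsWs) (fun d hd => List.mem_takeWhile_imp hd)]
          simp [List.replicate_succ, List.append_assoc]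
        rw [hfold]
        rw [ih ((c :: rest).dropWhile pvIsWs)
              (by rw [hdrop]
                  exact Nat.le_trans (List.length_dropWhile_le _ _) (Nat.succ_le_succ_iff.mp hlen))
              _ _ _ (by intro h; exact absurd h (by simp))]
        rw [pvGoB]
        simp [hc]
      · -- token run: prev must be true here
        have hprevT : prev = true := by
          cases prev
          · exact absurd (hprev rfl c (by simp)) hc
          · rfl
        subst hprevT
        have hcf : pvIsWs c = false := by simpa using hc
        have hdecomp : (c :: rest).takeWhile (fun d => !pvIsWs d)
              ++ (c :: rest).dropWhile (fun d => !pvIsWs d) = c :: rest :=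
          List.takeWhile_append_dropWhile
        have hrun : (c :: rest).takeWhile (fun d => !pvIsWs d)
            = c :: rest.takeWhile (fun d => !pvIsWs d) := by
          simp [hcf]
        have hfold : List.foldl pvStepA (off, toks, true) (c :: rest)
            = List.foldl pvStepA
                (off ++ List.replicate ((c :: rest).takeWhile (fun d => !pvIsWs d)).length
                   (((toks ++ [(c :: rest).takeWhile (fun d => !pvIsWs d)]).length : Int) - 1),
                 toks ++ [(c :: rest).takeWhile (fun d => !pvIsWs d)], false)
                ((c :: rest).dropWhile (fun d => !pvIsWs d)) := by
          conv_lhs => rw [← hdecomp, List.foldl_append]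
          rw [hrun]
          simp only [List.foldl_cons, pvStepA, hcf, Bool.false_eq_true, if_false, if_pos]
          rw [pvTokRun (rest.takeWhile (fun d => !pvIsWs d))
                (fun d hd => by simpa using List.mem_takeWhile_imp hd)]
          simp [List.replicate_succ, List.append_assoc]
        rw [hfold]
        have hdropHead : ∀ d ∈ ((c :: rest).dropWhile (fun d => !pvIsWs d)).head?,
            pvIsWs d = true := by
          intro d hd
          have := List.head?_dropWhile_not (fun d => !pvIsWs d) (c :: rest)
          cases hh : ((c :: rest).dropWhile (fun d => !pvIsWs d)).head? with
          | none => simp [hh] at hd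
          | some e =>
            rw [hh] at hd this
            simp at hd this
            subst hd; exact this
        rw [ih ((c :: rest).dropWhile (fun d => !pvIsWs d))
              (by have : (c :: rest).dropWhile (fun d => !pvIsWs d)
                      = rest.dropWhile (fun d => !pvIsWs d) := by
                    simp [hcf]
                  rw [this]
                  exact Nat.le_trans (List.length_dropWhile_le _ _) (Nat.succ_le_succ_iff.mp hlen))
              _ _ _ (fun _ => hdropHead)]
        rw [pvGoB]
        simp [hcf]

-- ===== VERDICT (by name: the statement is the Claim_ definition above) =====
theorem remove_extra_spaces_spec : Claim_equal_remove_extra_spaces := by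
  intro text _
  unfold Spec_remove_extra_spaces remove_extra_spaces remove_extra_spaces_alt
  have h := pvMain text.toList.length text.toList (Nat.le_refl _) [] [] true
      (by intro h; exact absurd h (by simp))
  have h1 : (List.foldl pvStepA ([], [], true) text.toList).1
      = (pvGoB text.toList [] []).1 := by rw [← h]
  have h2 : (List.foldl pvStepA ([], [], true) text.toList).2.1
      = (pvGoB text.toList [] []).2 := by rw [← h]
  simp [h1, h2]
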